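-- pv_equiv track=rewrite | github.com/jinsDevelopment/Algorithm-Study | 03-Stack/removeDuplicateLetters.py | removeDuplicateLetters_book2
-- ===== SOURCE A (Python) =====
-- from collections import Counter
--
-- def removeDuplicateLetters_book2(s: str) -> str:
--
--     counter, seen, stack = Counter(s), set(), []
--
--     for char in s:
--         counter[char] -= 1
--         if char in seen:
--             continue
--         # 뒤에 붙일 문자가 남아 있다면 스택에서 제거
--         while stack and char < stack[-1] and counter[stack[-1]] > 0:
--             seen.remove(stack.pop())
--         stack.append(char)
--         seen.add(char)
--
--     return ''.join(stack)
-- ===== SOURCE B (Python) =====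
-- def removeDuplicateLetters_book2(s: str) -> str:
--     # Recursive smallest-first-letter algorithm instead of the greedy counter/stack pass.
--     if not s:
--         return ''
--     c = min(ch for ch in set(s) if set(s[s.index(ch):]) == set(s))
--     i = s.index(c)
--     return c + removeDuplicateLetters_book2(''.join(ch for ch in s[i + 1:] if ch != c))
-- ===== Notes on version B (the rewrite author's own statement) =====
-- stated objective: alternative
-- what changed: A's one-pass greedy with a Counter, a seen-set and a monotonic stack is replaced by the recursive formulation: pick the smallest letter whose first-occurrence suffix still contains every distinct letter, emit it, strip it and recurse on the rest.
import Mathlib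
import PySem

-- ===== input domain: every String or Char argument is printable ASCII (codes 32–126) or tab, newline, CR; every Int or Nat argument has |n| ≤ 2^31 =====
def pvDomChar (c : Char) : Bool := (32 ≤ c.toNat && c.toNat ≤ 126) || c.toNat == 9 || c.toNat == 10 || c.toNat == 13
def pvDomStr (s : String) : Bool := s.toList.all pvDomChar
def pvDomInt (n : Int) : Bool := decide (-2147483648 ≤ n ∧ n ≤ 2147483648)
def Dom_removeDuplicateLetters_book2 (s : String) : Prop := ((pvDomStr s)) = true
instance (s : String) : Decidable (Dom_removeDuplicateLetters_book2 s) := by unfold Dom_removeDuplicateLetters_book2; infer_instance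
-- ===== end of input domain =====

-- B replaces A's greedy counter/seen/stack pass by the recursive smallest-viable-first-letter
-- algorithm (pick the least letter whose suffix still contains every distinct letter, recurse);
-- objective: alternative (a genuinely different algorithm, not claimed faster).

-- ===== PORT A =====

-- the while loop: `while stack and char < stack[-1] and counter[stack[-1]] > 0: seen.remove(stack.pop())`
-- (`seen.remove` is exact as `Set.discard` here: the popped element is always a member of `seen`)
def pvPopA (counter : PySem.Dict Char Int) (char : Char) (seen : PySem.Set Char)
    (stack : List Char) : PySem.Set Char × List Char :=
  if hst : stack = [] then (seen, stack)
  else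
    let top := stack.getLast hst                    -- stack[-1]
    if char < top ∧ counter.getD top 0 > 0 then     -- Counter lookup of a missing key is 0
      pvPopA counter char (PySem.Set.discard seen top) stack.dropLast
    else (seen, stack)
  termination_by stack.length
  decreasing_by
    have := List.length_pos_iff.mpr hst
    simp [List.length_dropLast]; omega

-- the body of `for char in s`
def pvStepA (st : PySem.Dict Char Int × PySem.Set Char × List Char) (char : Char) :
    PySem.Dict Char Int × PySem.Set Char × List Char :=
  let counter := st.1.modify char 0 (· - 1)                -- counter[char] -= 1
  if st.2.1.contains char then (counter, st.2.1, st.2.2)   -- if char in seen: continue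
  else
    let p := pvPopA counter char st.2.1 st.2.2
    (counter, PySem.Set.add p.1 char, p.2 ++ [char])       -- stack.append(char); seen.add(char)

def removeDuplicateLetters_book2 (s : String) : String :=
  -- counter, seen, stack = Counter(s), set(), []
  let st := s.toList.foldl pvStepA (PySem.Dict.counter s.toList, PySem.Set.empty, ([] : List Char))
  String.ofList st.2.2                              -- return ''.join(stack)

-- ===== PORT B =====

-- `set(s[s.index(ch):]) == set(s)` — s.index never raises here (ch is drawn from set(s))
def pvQualB (cs : List Char) (ch : Char) : Bool :=
  PySem.Set.equal
    (PySem.Set.ofList (PySem.List.slice cs (some (PySem.Chars.find cs [ch])) none))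
    (PySem.Set.ofList cs)

def pvAltGo (cs : List Char) : List Char :=
  if hcs : cs = [] then []                          -- if not s: return ''
  else
    -- c = min(ch for ch in set(s) if set(s[s.index(ch):]) == set(s))
    match hm : PySem.List.min? ((PySem.Set.ofList cs).filter (pvQualB cs)) (fun x => x) with
    | none => []                                    -- unreachable (the generator is never empty: s[0] qualifies)
    | some c =>
        let i := PySem.Chars.find cs [c]            -- i = s.index(c)
        -- return c + f(''.join(ch for ch in s[i+1:] if ch != c))
        c :: pvAltGo ((PySem.List.slice cs (some (i + 1)) none).filter (fun ch => decide (ch ≠ c)))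
  termination_by cs.length
  decreasing_by
    have hc : c ∈ cs := by
      have h1 := PySem.List.min?_mem hm
      have h2 := List.mem_filter.mp h1
      exact (PySem.Set.mem_ofList cs c).mp h2.1
    have hfind : 0 ≤ PySem.Chars.find cs [c] := by
      apply (PySem.Chars.find_nonneg_iff cs [c]).mpr
      obtain ⟨l1, l2, rfl⟩ := List.append_of_mem hc
      exact ⟨l1, l2, by simp⟩
    have hslice : PySem.List.slice cs (some (PySem.Chars.find cs [c] + 1)) none
        = cs.drop (PySem.Chars.find cs [c] + 1).toNat :=
      PySem.List.slice_from cs (by omega)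
    calc ((PySem.List.slice cs (some (PySem.Chars.find cs [c] + 1)) none).filter
            (fun ch => decide (ch ≠ c))).length
        ≤ (PySem.List.slice cs (some (PySem.Chars.find cs [c] + 1)) none).length :=
          List.length_filter_le _ _
      _ < cs.length := by
          rw [hslice, List.length_drop]
          have h1 : 1 ≤ (PySem.Chars.find cs [c] + 1).toNat := by omega
          have h2 : 0 < cs.length := List.length_pos_iff.mpr hcs
          omega

def removeDuplicateLetters_book2_alt (s : String) : String :=
  String.ofList (pvAltGo s.toList)

-- ===== PRECONDITION & SPEC =====
def Spec_removeDuplicateLetters_book2 (s : String) (out : String) : Prop := out = removeDuplicateLetters_book2_alt s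
instance (s : String) (out : String) : Decidable (Spec_removeDuplicateLetters_book2 s out) := by unfold Spec_removeDuplicateLetters_book2; infer_instance

-- ===== CLAIM (what is proved, stated in full; the proofs are below) =====
def Claim_equal_removeDuplicateLetters_book2 : Prop := ∀ (s : String), Dom_removeDuplicateLetters_book2 s → Spec_removeDuplicateLetters_book2 s (removeDuplicateLetters_book2 s)

-- ===== LEMMAS AND PROOFS =====

-- The abstract greedy pass: A's loop with the counter replaced by membership in the rest of the
-- input and the stack kept top-first; `pvG [] cs` is A's result on cs.
def pvG (stack : List Char) (rem : List Char) : List Char :=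
  match rem with
  | [] => stack.reverse
  | d :: rest =>
      if d ∈ stack then pvG stack rest
      else pvG (d :: stack.dropWhile (fun t => decide (d < t) && decide (t ∈ rest))) rest

-- `pvQual cs c`: every distinct letter of cs still occurs from the first occurrence of c onwards
def pvQual (cs : List Char) (c : Char) : Prop :=
  c ∈ cs ∧ ∀ x ∈ cs, x ∈ cs.drop (cs.idxOf c)

-- ---- generic helpers ----

lemma pvContains_iff (s : PySem.Set Char) (x : Char) : s.contains x = true ↔ x ∈ s := by
  simp [PySem.Set.contains]

lemma pvDiscard_mem (s : PySem.Set Char) (t x : Char) :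
    x ∈ PySem.Set.discard s t ↔ x ∈ s ∧ x ≠ t := by
  simp [PySem.Set.discard, List.mem_filter]

lemma pvEqual_iff (s t : PySem.Set Char) :
    PySem.Set.equal s t = true ↔ ((∀ x ∈ s, x ∈ t) ∧ ∀ x ∈ t, x ∈ s) := by
  simp [PySem.Set.equal, PySem.Set.issubset, PySem.Set.contains, List.all_eq_true]

lemma pvDropWhile_congr {p q : Char → Bool} :
    ∀ l : List Char, (∀ x ∈ l, p x = q x) → l.dropWhile p = l.dropWhile q := by
  intro l
  induction l with
  | nil => intro _; rfl
  | cons a l ih =>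
      intro h
      by_cases hp : p a = true
      · have hq : q a = true := by rw [← h a (by simp)]; exact hp
        rw [List.dropWhile_cons, List.dropWhile_cons, if_pos hp, if_pos hq]
        exact ih (fun x hx => h x (by simp [hx]))
      · have hq : ¬ q a = true := by rw [← h a (by simp)]; exact hp
        rw [List.dropWhile_cons, List.dropWhile_cons, if_neg hp, if_neg hq]

lemma pvIdxOf_le (c : Char) :
    ∀ (l : List Char) (j : Nat) (h : j < l.length), l[j]'h = c → l.idxOf c ≤ j := by
  intro l
  induction l with
  | nil => intro j h; simp at h
  | cons a l ih =>
      intro j h he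
      cases j with
      | zero =>
          simp at he
          simp [he, List.idxOf_cons_self]
      | succ j =>
          by_cases hac : a = c
          · simp [hac, List.idxOf_cons_self]
          · have hstep : (a :: l).idxOf c = l.idxOf c + 1 := by
              simp [List.idxOf_cons, hac]
            rw [hstep]
            have := ih j (by simpa using h) (by simpa using he)
            omega

lemma pvMem_drop_of_le (x : Char) (l : List Char) {k j : Nat} (hkj : k ≤ j) :
    x ∈ l.drop j → x ∈ l.drop k := by
  intro hx
  have heq : l.drop j = (l.drop k).drop (j - k) := by
    rw [List.drop_drop]; congr 1; omega
  rw [heq] at hx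
  exact List.mem_of_mem_drop hx

lemma pvSingleton_prefix_drop (c : Char) (l : List Char) (j : Nat) :
    [c] <+: l.drop j ↔ ∃ h : j < l.length, l[j]'h = c := by
  constructor
  · rintro ⟨t, ht⟩
    have hj : j < l.length := by
      by_contra hge
      have : l.drop j = [] := List.drop_eq_nil_of_le (by omega)
      rw [this] at ht; simp at ht
    refine ⟨hj, ?_⟩
    rw [List.drop_eq_getElem_cons hj] at ht
    have h2 : c :: t = l[j]'hj :: l.drop (j + 1) := by simpa using ht
    exact (List.cons_eq_cons.mp h2).1.symm
  · rintro ⟨hj, he⟩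
    rw [List.drop_eq_getElem_cons hj, he]
    exact ⟨_, rfl⟩

lemma pvIdxOf_lt (c : Char) (cs : List Char) (hc : c ∈ cs) : cs.idxOf c < cs.length :=
  List.idxOf_lt_length_of_mem hc

lemma pvGetElem_idxOf (c : Char) (cs : List Char) (hc : c ∈ cs) :
    cs[cs.idxOf c]'(pvIdxOf_lt c cs hc) = c :=
  List.getElem_idxOf (pvIdxOf_lt c cs hc)

lemma pvFind_singleton (c : Char) (cs : List Char) (hc : c ∈ cs) :
    PySem.Chars.find cs [c] = (cs.idxOf c : Int) := by
  have hinf : [c] <:+: cs := by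
    obtain ⟨l1, l2, rfl⟩ := List.append_of_mem hc
    exact ⟨l1, l2, by simp⟩
  have h0 : 0 ≤ PySem.Chars.find cs [c] := (PySem.Chars.find_nonneg_iff cs [c]).mpr hinf
  obtain ⟨hpre, hlt⟩ := PySem.Chars.find_spec h0
  obtain ⟨hflt, hfe⟩ := (pvSingleton_prefix_drop c cs _).mp hpre
  have h1 : cs.idxOf c ≤ (PySem.Chars.find cs [c]).toNat := pvIdxOf_le c cs _ hflt hfe
  have h2 : ¬ (cs.idxOf c < (PySem.Chars.find cs [c]).toNat) := by
    intro hlt'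
    apply hlt _ hlt'
    exact (pvSingleton_prefix_drop c cs _).mpr ⟨pvIdxOf_lt c cs hc, pvGetElem_idxOf c cs hc⟩
  omega

-- ---- port A equals pvG ----

lemma pvPopA_nil (counter : PySem.Dict Char Int) (d : Char) (seen : PySem.Set Char) :
    pvPopA counter d seen [] = (seen, []) := by
  rw [pvPopA]
  simp

lemma pvPopA_concat (counter : PySem.Dict Char Int) (d : Char) (seen : PySem.Set Char)
    (l : List Char) (t : Char) :
    pvPopA counter d seen (l ++ [t]) =
      if d < t ∧ counter.getD t 0 > 0 then
        pvPopA counter d (PySem.Set.discard seen t) l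
      else (seen, l ++ [t]) := by
  rw [pvPopA]
  simp [List.getLast_append, List.dropLast_concat]

lemma pvPopA_run (counter : PySem.Dict Char Int) (d : Char) (rest : List Char)
    (hcnt : ∀ t, counter.getD t 0 = (List.count t rest : Int)) :
    ∀ (gs : List Char) (seen : PySem.Set Char),
      (∀ x, x ∈ seen ↔ x ∈ gs) → gs.Nodup →
      ∃ seen',
        pvPopA counter d seen gs.reverse
          = (seen', (gs.dropWhile (fun t => decide (d < t) && decide (t ∈ rest))).reverse) ∧
        ∀ x, x ∈ seen' ↔ x ∈ gs.dropWhile (fun t => decide (d < t) && decide (t ∈ rest)) := by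
  intro gs
  induction gs with
  | nil =>
      intro seen hseen _
      exact ⟨seen, by simp [pvPopA_nil], by simpa using hseen⟩
  | cons t gs ih =>
      intro seen hseen hnd
      have hrev : (t :: gs).reverse = gs.reverse ++ [t] := by simp
      rw [hrev, pvPopA_concat]
      have hcond : (d < t ∧ counter.getD t 0 > 0) ↔ (d < t ∧ t ∈ rest) := by
        rw [hcnt t]
        constructor
        · rintro ⟨h1, h2⟩
          exact ⟨h1, List.count_pos_iff.mp (by exact_mod_cast h2)⟩
        · rintro ⟨h1, h2⟩
          exact ⟨h1, by exact_mod_cast Int.natCast_pos.mpr (List.count_pos_iff.mpr h2)⟩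
      by_cases hc : d < t ∧ t ∈ rest
      · rw [if_pos (hcond.mpr hc)]
        have hnotmem : t ∉ gs := (List.nodup_cons.mp hnd).1
        have hseen' : ∀ x, x ∈ PySem.Set.discard seen t ↔ x ∈ gs := by
          intro x
          rw [pvDiscard_mem, hseen x]
          constructor
          · rintro ⟨hx, hne⟩
            cases List.mem_cons.mp hx with
            | inl h => exact absurd h hne
            | inr h => exact h
          · intro hx
            exact ⟨List.mem_cons.mpr (Or.inr hx), fun he => hnotmem (he ▸ hx)⟩
        obtain ⟨seen', heq, hmem⟩ := ih (PySem.Set.discard seen t) hseen' (List.nodup_cons.mp hnd).2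
        have hdw : (t :: gs).dropWhile (fun t => decide (d < t) && decide (t ∈ rest))
            = gs.dropWhile (fun t => decide (d < t) && decide (t ∈ rest)) := by
          rw [List.dropWhile_cons]
          simp only [hc.1, hc.2, decide_true, Bool.and_self, if_true]
        rw [hdw]
        exact ⟨seen', heq, hmem⟩
      · rw [if_neg (fun h => hc (hcond.mp h))]
        have hP : ¬ ((decide (d < t) && decide (t ∈ rest)) = true) := by
          simpa using hc
        have hdw : (t :: gs).dropWhile (fun t => decide (d < t) && decide (t ∈ rest))
            = t :: gs := by
          rw [List.dropWhile_cons, if_neg hP]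
        rw [hdw]
        exact ⟨seen, by simp, hseen⟩

lemma pvRunA :
    ∀ (rem : List Char) (counter : PySem.Dict Char Int) (seen : PySem.Set Char) (gs : List Char),
      (∀ x, counter.getD x 0 = (List.count x rem : Int)) →
      (∀ x, x ∈ seen ↔ x ∈ gs) → gs.Nodup →
      (rem.foldl pvStepA (counter, seen, gs.reverse)).2.2 = pvG gs rem := by
  intro rem
  induction rem with
  | nil =>
      intro counter seen gs _ _ _
      simp [pvG]
  | cons d rest ih =>
      intro counter seen gs hcnt hseen hnd
      rw [List.foldl_cons]
      have hcnt' : ∀ x, (counter.modify d 0 (· - 1)).getD x 0 = (List.count x rest : Int) := by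
        intro x
        rw [PySem.Dict.getD_modify]
        by_cases hx : x = d
        · subst hx
          rw [if_pos rfl, hcnt x, List.count_cons_self]
          push_cast; ring
        · rw [if_neg hx, hcnt x]
          have hne : List.count x (d :: rest) = List.count x rest := by
            simp [List.count_cons, Ne.symm hx]
          rw [hne]
      by_cases hd : d ∈ gs
      · have hcontains : seen.contains d = true := (pvContains_iff seen d).mpr ((hseen d).mpr hd)
        have hstep : pvStepA (counter, seen, gs.reverse) d
            = (counter.modify d 0 (· - 1), seen, gs.reverse) := by
          simp only [pvStepA]
          rw [if_pos hcontains]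
        rw [hstep, ih _ seen gs hcnt' hseen hnd]
        rw [pvG, if_pos hd]
      · have hcontains : ¬ (seen.contains d = true) := by
          rw [pvContains_iff seen d, hseen d]; exact hd
        obtain ⟨seen', heq, hmem⟩ :=
          pvPopA_run (counter.modify d 0 (· - 1)) d rest hcnt' gs seen hseen hnd
        have hstep : pvStepA (counter, seen, gs.reverse) d
            = (counter.modify d 0 (· - 1), PySem.Set.add seen' d,
               (gs.dropWhile (fun t => decide (d < t) && decide (t ∈ rest))).reverse ++ [d]) := by
          simp only [pvStepA]
          rw [if_neg hcontains]
          simp only [heq]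
        rw [hstep]
        have hrev : (gs.dropWhile (fun t => decide (d < t) && decide (t ∈ rest))).reverse ++ [d]
            = (d :: gs.dropWhile (fun t => decide (d < t) && decide (t ∈ rest))).reverse := by
          simp
        rw [hrev]
        have hsub : (gs.dropWhile (fun t => decide (d < t) && decide (t ∈ rest))).Sublist gs :=
          List.dropWhile_sublist _
        have hnd' : (d :: gs.dropWhile (fun t => decide (d < t) && decide (t ∈ rest))).Nodup := by
          rw [List.nodup_cons]
          exact ⟨fun hmem' => hd (hsub.mem hmem'), hsub.nodup hnd⟩
        have hseen'' : ∀ x, x ∈ PySem.Set.add seen' d ↔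
            x ∈ d :: gs.dropWhile (fun t => decide (d < t) && decide (t ∈ rest)) := by
          intro x
          rw [PySem.Set.mem_add _ d x, hmem x, List.mem_cons]
          tauto
        rw [ih _ _ _ hcnt' hseen'' hnd']
        rw [pvG, if_neg hd]

lemma pvA_eq_g (s : String) :
    removeDuplicateLetters_book2 s = String.ofList (pvG [] s.toList) := by
  unfold removeDuplicateLetters_book2
  have h := pvRunA s.toList (PySem.Dict.counter s.toList) PySem.Set.empty []
    (fun x => PySem.Dict.getD_counter s.toList x)
    (fun x => by simp [PySem.Set.empty]) List.nodup_nil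
  simp only [List.reverse_nil] at h
  simp only [h]

-- ---- port B: the chosen letter is the least pvQual letter ----

lemma pvQual_head (h : Char) (t : List Char) : pvQual (h :: t) h := by
  refine ⟨List.mem_cons_self, ?_⟩
  intro x hx
  rw [List.idxOf_cons_self]
  simpa using hx

lemma pvQualB_iff (cs : List Char) (c : Char) (hc : c ∈ cs) :
    pvQualB cs c = true ↔ pvQual cs c := by
  unfold pvQualB
  rw [pvFind_singleton c cs hc]
  rw [PySem.List.slice_from cs (by positivity), Int.toNat_natCast]
  rw [pvEqual_iff]
  constructor
  · rintro ⟨_, h2⟩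
    refine ⟨hc, ?_⟩
    intro x hx
    have := h2 x ((PySem.Set.mem_ofList cs x).mpr hx)
    exact (PySem.Set.mem_ofList _ x).mp this
  · rintro ⟨_, h2⟩
    constructor
    · intro x hx
      have := (PySem.Set.mem_ofList _ x).mp hx
      exact (PySem.Set.mem_ofList cs x).mpr (List.mem_of_mem_drop this)
    · intro x hx
      have := (PySem.Set.mem_ofList cs x).mp hx
      exact (PySem.Set.mem_ofList _ x).mpr (h2 x this)

lemma pvCands_ne_nil (h : Char) (t : List Char) :
    (PySem.Set.ofList (h :: t)).filter (pvQualB (h :: t)) ≠ [] := by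
  intro hnil
  have hmem : h ∈ (PySem.Set.ofList (h :: t)).filter (pvQualB (h :: t)) := by
    rw [List.mem_filter]
    exact ⟨(PySem.Set.mem_ofList _ h).mpr List.mem_cons_self,
      (pvQualB_iff _ h List.mem_cons_self).mpr (pvQual_head h t)⟩
  rw [hnil] at hmem
  simp at hmem

-- ---- the heart: pvG satisfies B's recurrence ----

lemma pvPhase1 :
    ∀ (pp r st : List Char), st.Nodup →
      ∃ st', pvG st (pp ++ r) = pvG st' r ∧ st'.Nodup ∧ ∀ t ∈ st', t ∈ st ∨ t ∈ pp := by
  intro pp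
  induction pp with
  | nil =>
      intro r st hnd
      exact ⟨st, rfl, hnd, fun t ht => Or.inl ht⟩
  | cons d pp ih =>
      intro r st hnd
      rw [List.cons_append, pvG]
      by_cases hd : d ∈ st
      · rw [if_pos hd]
        obtain ⟨st', heq, hnd', hsub⟩ := ih r st hnd
        refine ⟨st', heq, hnd', fun t ht => ?_⟩
        rcases hsub t ht with h | h
        · exact Or.inl h
        · exact Or.inr (List.mem_cons.mpr (Or.inr h))
      · rw [if_neg hd]
        have hsubl : (st.dropWhile (fun t => decide (d < t) && decide (t ∈ pp ++ r))).Sublist st :=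
          List.dropWhile_sublist _
        have hnd1 : (d :: st.dropWhile (fun t => decide (d < t) && decide (t ∈ pp ++ r))).Nodup := by
          rw [List.nodup_cons]
          exact ⟨fun hmem => hd (hsubl.mem hmem), hsubl.nodup hnd⟩
        obtain ⟨st', heq, hnd', hsub⟩ :=
          ih r (d :: st.dropWhile (fun t => decide (d < t) && decide (t ∈ pp ++ r))) hnd1
        refine ⟨st', heq, hnd', fun t ht => ?_⟩
        rcases hsub t ht with h | h
        · rcases List.mem_cons.mp h with h' | h'
          · exact Or.inr (List.mem_cons.mpr (Or.inl h'))
          · exact Or.inl (hsubl.mem h')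
        · exact Or.inr (List.mem_cons.mpr (Or.inr h))

lemma pvPhase2 (cs : List Char) (c : Char)
    (hmin : ∀ d, pvQual cs d → c ≤ d) :
    ∀ (q' : List Char) (gs : List Char), gs.Nodup → c ∉ gs →
      (∀ x ∈ cs, x ∈ gs ∨ x = c ∨ x ∈ q') → (∃ j, q' = cs.drop j) →
      pvG (gs ++ [c]) q' = c :: pvG gs (q'.filter (fun x => decide (x ≠ c))) := by
  intro q'
  induction q' with
  | nil =>
      intro gs _ _ _ _
      simp [pvG]
  | cons d rest ih =>
      intro gs hnd hcgs hinv hsuf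
      obtain ⟨j, hj⟩ := hsuf
      have hjlt : j < cs.length := by
        by_contra hge
        have : cs.drop j = [] := List.drop_eq_nil_of_le (by omega)
        rw [this] at hj; simp at hj
      have hj' : d :: rest = cs[j]'hjlt :: cs.drop (j + 1) := by
        rw [← List.drop_eq_getElem_cons hjlt]; exact hj
      have hcsj : cs[j]'hjlt = d := (List.cons_eq_cons.mp hj').1.symm
      have hrest : rest = cs.drop (j + 1) := (List.cons_eq_cons.mp hj').2
      have hd_cs : d ∈ cs := by
        have : d ∈ cs.drop j := by rw [← hj]; exact List.mem_cons_self
        exact List.mem_of_mem_drop this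
      by_cases hdc : d = c
      · subst hdc
        rw [pvG, if_pos (by simp)]
        have hfilter : (d :: rest).filter (fun x => decide (x ≠ d)) =
            rest.filter (fun x => decide (x ≠ d)) := by
          simp [List.filter_cons]
        rw [hfilter]
        apply ih gs hnd hcgs ?_ ⟨j + 1, hrest⟩
        intro x hx
        rcases hinv x hx with h | h | h
        · exact Or.inl h
        · exact Or.inr (Or.inl h)
        · rcases List.mem_cons.mp h with h' | h'
          · exact Or.inr (Or.inl h')
          · exact Or.inr (Or.inr h')
      · by_cases hdgs : d ∈ gs
        · rw [pvG, if_pos (List.mem_append.mpr (Or.inl hdgs))]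
          have hfilter : (d :: rest).filter (fun x => decide (x ≠ c)) =
              d :: rest.filter (fun x => decide (x ≠ c)) := by
            simp [List.filter_cons, hdc]
          rw [hfilter, pvG, if_pos hdgs]
          apply ih gs hnd hcgs ?_ ⟨j + 1, hrest⟩
          intro x hx
          rcases hinv x hx with h | h | h
          · exact Or.inl h
          · exact Or.inr (Or.inl h)
          · rcases List.mem_cons.mp h with h' | h'
            · exact Or.inl (h' ▸ hdgs)
            · exact Or.inr (Or.inr h')
        · -- push case
          have hdmem : ¬ d ∈ gs ++ [c] := by
            intro hmem
            rcases List.mem_append.mp hmem with h | h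
            · exact hdgs h
            · exact hdc (by simpa using h)
          have hfilter : (d :: rest).filter (fun x => decide (x ≠ c)) =
              d :: rest.filter (fun x => decide (x ≠ c)) := by
            simp [List.filter_cons, hdc]
          rw [hfilter, pvG, pvG, if_neg hdmem, if_neg hdgs]
          have hcongr :
              gs.dropWhile (fun t => decide (d < t) && decide (t ∈ rest))
                = gs.dropWhile (fun t => decide (d < t) &&
                    decide (t ∈ rest.filter (fun x => decide (x ≠ c)))) := by
            apply pvDropWhile_congr
            intro t htgs
            have htc : t ≠ c := fun he => hcgs (he ▸ htgs)
            simp only [List.mem_filter, decide_eq_true_eq, htc, decide_true, Bool.and_true]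
            by_cases h1 : t ∈ rest <;> simp [h1, htc]
          have hkey : (gs ++ [c]).dropWhile (fun t => decide (d < t) && decide (t ∈ rest))
              = gs.dropWhile (fun t => decide (d < t) &&
                  decide (t ∈ rest.filter (fun x => decide (x ≠ c)))) ++ [c] := by
            rw [List.dropWhile_append]
            by_cases hall : (gs.dropWhile (fun t => decide (d < t) && decide (t ∈ rest))).isEmpty
            · have halls : gs.dropWhile (fun t => decide (d < t) && decide (t ∈ rest)) = [] :=
                List.isEmpty_iff.mp hall
              have hallP : ∀ x ∈ gs, (decide (d < x) && decide (x ∈ rest)) = true :=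
                List.dropWhile_eq_nil_iff.mp halls
              -- c itself is never popped: otherwise d would be a qualifying letter below c
              have hPqc : ¬ ((decide (d < c) && decide (c ∈ rest)) = true) := by
                intro hcp
                simp only [Bool.and_eq_true, decide_eq_true_eq] at hcp
                obtain ⟨hdc', hcr⟩ := hcp
                have hqd : pvQual cs d := by
                  refine ⟨hd_cs, ?_⟩
                  intro y hy
                  have hidx : cs.idxOf d ≤ j := pvIdxOf_le d cs j hjlt hcsj
                  have hyrest : y ∈ cs.drop j := by
                    rw [← hj]
                    rcases hinv y hy with h | h | h
                    · have := hallP y h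
                      simp only [Bool.and_eq_true, decide_eq_true_eq] at this
                      exact List.mem_cons.mpr (Or.inr this.2)
                    · exact List.mem_cons.mpr (Or.inr (h ▸ hcr))
                    · exact h
                  exact pvMem_drop_of_le y cs hidx hyrest
                have := hmin d hqd
                exact absurd hdc' (not_lt.mpr this)
              rw [if_pos hall, ← hcongr, halls]
              rw [List.dropWhile_cons, if_neg hPqc]
              simp
            · rw [if_neg hall, hcongr]
          rw [hkey]
          have hstack : d :: (gs.dropWhile (fun t => decide (d < t) &&
                  decide (t ∈ rest.filter (fun x => decide (x ≠ c)))) ++ [c])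
              = (d :: gs.dropWhile (fun t => decide (d < t) &&
                  decide (t ∈ rest.filter (fun x => decide (x ≠ c))))) ++ [c] := by
            simp
          rw [hstack]
          have hsubl : (gs.dropWhile (fun t => decide (d < t) &&
              decide (t ∈ rest.filter (fun x => decide (x ≠ c))))).Sublist gs :=
            List.dropWhile_sublist _
          apply ih _ ?nd ?ninc ?inv ⟨j + 1, hrest⟩
          case nd =>
            rw [List.nodup_cons]
            exact ⟨fun hmem => hdgs (hsubl.mem hmem), hsubl.nodup hnd⟩
          case ninc =>
            intro hmem
            rcases List.mem_cons.mp hmem with h | h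
            · exact hdc h.symm
            · exact hcgs (hsubl.mem h)
          case inv =>
            intro x hx
            rcases hinv x hx with h | h | h
            · rw [← List.takeWhile_append_dropWhile
                (p := fun t => decide (d < t) && decide (t ∈ rest.filter (fun x => decide (x ≠ c))))
                (l := gs)] at h
              rcases List.mem_append.mp h with h' | h'
              · have := List.mem_takeWhile_imp h'
                simp only [Bool.and_eq_true, decide_eq_true_eq, List.mem_filter] at this
                exact Or.inr (Or.inr this.2.1)
              · exact Or.inl (List.mem_cons.mpr (Or.inr h'))
            · exact Or.inr (Or.inl h)
            · rcases List.mem_cons.mp h with h' | h'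
              · exact Or.inl (List.mem_cons.mpr (Or.inl h'))
              · exact Or.inr (Or.inr h')

lemma pvG_step (cs : List Char) (c : Char) (hq : pvQual cs c)
    (hmin : ∀ d, pvQual cs d → c ≤ d) :
    pvG [] cs = c :: pvG [] ((cs.drop (cs.idxOf c + 1)).filter (fun x => decide (x ≠ c))) := by
  have hi : cs.idxOf c < cs.length := pvIdxOf_lt c cs hq.1
  have hdrop : cs.drop (cs.idxOf c) = c :: cs.drop (cs.idxOf c + 1) := by
    rw [List.drop_eq_getElem_cons hi, pvGetElem_idxOf c cs hq.1]
  have hdecomp : cs = cs.take (cs.idxOf c) ++ (c :: cs.drop (cs.idxOf c + 1)) := by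
    conv_lhs => rw [← List.take_append_drop (cs.idxOf c) cs]
    rw [hdrop]
  have hp_gt : ∀ x ∈ cs.take (cs.idxOf c), c < x := by
    intro x hx
    obtain ⟨jx, hjx, hex⟩ := List.mem_iff_getElem.mp hx
    have hjlen : jx < cs.idxOf c := by
      have := hjx; simp [List.length_take] at this; omega
    have hjcs : jx < cs.length := by omega
    have hex' : cs[jx]'(by omega) = x := by
      rw [← hex, List.getElem_take]
    have hidxle : cs.idxOf x ≤ jx := pvIdxOf_le x cs jx hjcs hex'
    have hqualx : pvQual cs x := by
      refine ⟨List.mem_of_mem_take hx, ?_⟩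
      intro y hy
      exact pvMem_drop_of_le y cs (by omega) (hq.2 y hy)
    have hle := hmin x hqualx
    have hne : x ≠ c := by
      intro he; subst he; omega
    exact lt_of_le_of_ne hle (fun he => hne he.symm)
  have hp_q : ∀ x ∈ cs.take (cs.idxOf c), x ∈ cs.drop (cs.idxOf c + 1) := by
    intro x hx
    have hxcs := List.mem_of_mem_take hx
    have hmem := hq.2 x hxcs
    rw [hdrop] at hmem
    rcases List.mem_cons.mp hmem with h | h
    · exact absurd (hp_gt x hx) (by rw [h]; exact lt_irrefl c)
    · exact h
  conv_lhs => rw [hdecomp]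
  obtain ⟨st', heq, hnd', hsub⟩ :=
    pvPhase1 (cs.take (cs.idxOf c)) (c :: cs.drop (cs.idxOf c + 1)) [] List.nodup_nil
  rw [heq]
  have hcst : c ∉ st' := by
    intro hcs'
    rcases hsub c hcs' with h | h
    · simp at h
    · exact absurd (hp_gt c h) (lt_irrefl c)
  rw [pvG, if_neg hcst]
  have hdw : st'.dropWhile (fun t => decide (c < t) && decide (t ∈ cs.drop (cs.idxOf c + 1)))
      = [] := by
    rw [List.dropWhile_eq_nil_iff]
    intro t ht
    rcases hsub t ht with h | h
    · simp at h
    · simp [hp_gt t h, hp_q t h]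
  rw [hdw]
  have hph2 := pvPhase2 cs c hmin (cs.drop (cs.idxOf c + 1)) [] List.nodup_nil (by simp)
    ?_ ⟨cs.idxOf c + 1, rfl⟩
  · simpa using hph2
  · intro x hx
    have hmem := hq.2 x hx
    rw [hdrop] at hmem
    rcases List.mem_cons.mp hmem with h | h
    · exact Or.inr (Or.inl h)
    · exact Or.inr (Or.inr h)

lemma pvAltGo_eq_g : ∀ (n : Nat) (cs : List Char), cs.length ≤ n → pvAltGo cs = pvG [] cs := by
  intro n
  induction n with
  | zero =>
      intro cs hlen
      have : cs = [] := List.eq_nil_of_length_eq_zero (by omega)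
      subst this
      rw [pvAltGo]
      simp [pvG]
  | succ n ih =>
      intro cs hlen
      by_cases hcs : cs = []
      · subst hcs
        rw [pvAltGo]
        simp [pvG]
      · rw [pvAltGo, dif_neg hcs]
        split
        · exfalso
          rename_i hm
          obtain ⟨h, t, rfl⟩ := List.exists_cons_of_ne_nil hcs
          exact pvCands_ne_nil h t ((PySem.List.min?_eq_none_iff _ _).mp hm)
        · rename_i c hm
          have hcmem : c ∈ cs := by
            have h1 := PySem.List.min?_mem hm
            exact (PySem.Set.mem_ofList cs c).mp (List.mem_filter.mp h1).1
          have hqc : pvQual cs c := by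
            have h1 := PySem.List.min?_mem hm
            exact (pvQualB_iff cs c hcmem).mp (List.mem_filter.mp h1).2
          have hminc : ∀ d, pvQual cs d → c ≤ d := by
            intro d hd
            have hdmem : d ∈ (PySem.Set.ofList cs).filter (pvQualB cs) := by
              rw [List.mem_filter]
              exact ⟨(PySem.Set.mem_ofList cs d).mpr hd.1, (pvQualB_iff cs d hd.1).mpr hd⟩
            exact PySem.List.min?_isMin hm d hdmem
          have hslice : PySem.List.slice cs (some (PySem.Chars.find cs [c] + 1)) none
              = cs.drop (cs.idxOf c + 1) := by
            rw [pvFind_singleton c cs hcmem]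
            have hcast : ((cs.idxOf c : Int) + 1) = ((cs.idxOf c + 1 : Nat) : Int) := by
              push_cast; ring
            rw [hcast, PySem.List.slice_from_natCast]
          simp only [hslice]
          rw [pvG_step cs c hqc hminc]
          congr 1
          apply ih
          have h1 : (cs.drop (cs.idxOf c + 1)).length = cs.length - (cs.idxOf c + 1) :=
            List.length_drop
          have h2 := List.length_filter_le (fun x => decide (x ≠ c)) (cs.drop (cs.idxOf c + 1))
          have h3 : 0 < cs.length := List.length_pos_iff.mpr hcs
          omega

-- ===== VERDICT (by name: the statement is the Claim_ definition above) =====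
theorem removeDuplicateLetters_book2_spec : Claim_equal_removeDuplicateLetters_book2 := by
  intro s _
  unfold Spec_removeDuplicateLetters_book2 removeDuplicateLetters_book2_alt
  rw [pvA_eq_g s, pvAltGo_eq_g s.toList.length s.toList le_rfl]
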